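-- pv_equiv track=rewrite | github.com/danval76/mini_proys_python | contar_pares.py | contar_y_sumar_pares
-- ===== SOURCE A (Python) =====
-- def contar_y_sumar_pares(limite):
--     """
--     Calcula la cantidad y la suma de números pares en el rango de 0 hasta el límite dado.
--     """
--     contador_pares = 0
--     acumulado_pares = 0
--
--     # El rango debe incluir el número límite, por eso usamos limite + 1
--     for numero_actual in range(limite + 1):
--
--         # Operador módulo (%): Si el resto de dividir por 2 es 0, el número es par.
--         if numero_actual % 2 == 0:
--             contador_pares += 1       # Equivalente a contador_pares = contador_pares + 1
--             acumulado_pares += numero_actual # Equivalente a acumulado_pares = acumulado_pares + numero_actual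
--
--     return contador_pares, acumulado_pares # Devolvemos ambos resultados
-- ===== SOURCE B (Python) =====
-- def contar_y_sumar_pares(limite):
--     """
--     Calcula la cantidad y la suma de números pares en el rango de 0 hasta el límite dado.
--     Forma cerrada O(1): los pares son 0, 2, ..., 2k con k = limite // 2.
--     """
--     if limite < 0:
--         return 0, 0
--     k = limite // 2
--     return k + 1, k * (k + 1)
-- ===== Notes on version B (the rewrite author's own statement) =====
-- stated objective: faster
-- what changed: Replaced the O(n) loop over range(limite+1) by the closed form k=limite//2, count=k+1, sum=k*(k+1) (with (0,0) for negative limite).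
import Mathlib
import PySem

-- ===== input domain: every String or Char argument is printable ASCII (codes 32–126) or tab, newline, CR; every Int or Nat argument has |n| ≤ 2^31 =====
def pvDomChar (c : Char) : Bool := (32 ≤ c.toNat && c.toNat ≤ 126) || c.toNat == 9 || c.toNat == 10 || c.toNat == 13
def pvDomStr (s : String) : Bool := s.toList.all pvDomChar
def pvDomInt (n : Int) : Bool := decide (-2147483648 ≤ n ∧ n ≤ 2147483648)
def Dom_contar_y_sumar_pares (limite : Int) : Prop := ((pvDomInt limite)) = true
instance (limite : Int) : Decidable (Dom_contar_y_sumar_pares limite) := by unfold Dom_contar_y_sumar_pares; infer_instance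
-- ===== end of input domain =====

-- B replaces A's O(n) loop over range(limite+1) by the O(1) closed form k = limite//2, count = k+1, sum = k*(k+1).

-- ===== PORT A =====
-- literal port: loop over range(limite+1) accumulating (contador_pares, acumulado_pares)
def contar_y_sumar_pares (limite : Int) : List Int :=
  let st := (PySem.List.pyRange 0 (limite + 1) 1).foldl
    (fun (s : Int × Int) numero_actual =>
      if PySem.Int.mod numero_actual 2 == 0 then (s.1 + 1, s.2 + numero_actual) else s)
    (0, 0)
  [st.1, st.2]

-- ===== PORT B =====
def contar_y_sumar_pares_alt (limite : Int) : List Int :=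
  if limite < 0 then [0, 0]
  else
    let k := PySem.Int.floordiv limite 2
    [k + 1, k * (k + 1)]

-- ===== PRECONDITION & SPEC =====
def Spec_contar_y_sumar_pares (limite : Int) (out : List Int) : Prop := out = contar_y_sumar_pares_alt limite
instance (limite : Int) (out : List Int) : Decidable (Spec_contar_y_sumar_pares limite out) := by unfold Spec_contar_y_sumar_pares; infer_instance

-- ===== CLAIM (what is proved, stated in full; the proofs are below) =====
def Claim_equal_contar_y_sumar_pares : Prop := ∀ (limite : Int), Dom_contar_y_sumar_pares limite → Spec_contar_y_sumar_pares limite (contar_y_sumar_pares limite)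

-- ===== LEMMAS AND PROOFS =====

-- the loop over range(0, N) yields (⌈N/2⌉, ⌈N/2⌉·(⌈N/2⌉-1)) for natural N
theorem contar_loop_eval (N : Nat) :
    (PySem.List.pyRange 0 (N : Int) 1).foldl
      (fun (s : Int × Int) numero_actual =>
        if PySem.Int.mod numero_actual 2 == 0 then (s.1 + 1, s.2 + numero_actual) else s)
      (0, 0)
    = (((N : Int) + 1) / 2, (((N : Int) + 1) / 2) * ((((N : Int) + 1) / 2) - 1)) := by
  induction N with
  | zero => simp [PySem.List.pyRange_one_eq_nil]
  | succ n ih =>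
      have h : ((n + 1 : Nat) : Int) = (n : Int) + 1 := by push_cast; ring
      rw [h, PySem.List.pyRange_one_succ_right (by positivity), List.foldl_append, ih]
      simp only [List.foldl_cons, List.foldl_nil]
      rw [PySem.Int.mod_eq_emod_of_pos (by norm_num)]
      rcases Int.even_or_odd (n : Int) with ⟨k, hk⟩ | ⟨k, hk⟩
      · rw [hk]
        have hm : (k + k) % 2 = 0 := by omega
        rw [hm]
        norm_num
        have h1 : (k + k + 1 + 1) / 2 = k + 1 := by omega
        have h2 : (k + k + 1) / 2 = k := by omega
        rw [h1, h2]
        exact ⟨by ring, by ring⟩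
      · rw [hk]
        have hm : (2 * k + 1) % 2 = 1 := by omega
        rw [hm]
        norm_num
        have h1 : (2 * k + 1 + 1 + 1) / 2 = k + 1 := by omega
        have h2 : (2 * k + 1 + 1) / 2 = k + 1 := by omega
        rw [h1, h2]
        exact ⟨rfl, rfl⟩

-- ===== VERDICT (by name: the statement is the Claim_ definition above) =====
theorem contar_y_sumar_pares_spec : Claim_equal_contar_y_sumar_pares := by
  intro limite _
  unfold Spec_contar_y_sumar_pares contar_y_sumar_pares contar_y_sumar_pares_alt
  by_cases hneg : limite < 0
  · rw [PySem.List.pyRange_one_eq_nil (by omega)]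
    simp [hneg]
  · rw [if_neg hneg]
    obtain ⟨N, rfl⟩ := Int.eq_ofNat_of_zero_le (not_lt.mp hneg)
    have hcast : ((N : Int) + 1) = (((N + 1 : Nat) : Int)) := by push_cast; ring
    rw [hcast, contar_loop_eval (N + 1)]
    rw [PySem.Int.floordiv_eq_ediv_of_pos (by norm_num)]
    have h1 : (((N + 1 : Nat) : Int) + 1) / 2 = (N : Int) / 2 + 1 := by push_cast; omega
    simp only [h1, List.cons.injEq, and_true]
    exact ⟨trivial, by ring⟩
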